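-- pv_equiv track=rewrite | github.com/zimiingli/planning | experiment/style.py | categorize_method
-- ===== SOURCE A (Python) =====
-- CB_PALETTE = {
--     'CaTS':     '#2980B9',   # blue
--     'SEAG':     '#E67E22',   # orange
--     'CoRefine': '#27AE60',   # green
--     'CATTS':    '#8E44AD',   # purple
--     'AUQ':      '#D35400',   # dark orange
--     's1_budget':'#16A085',   # teal
-- }
--
-- def categorize_method(method):
--     """Return category string for a method name."""
--     dial = {'se_few5_filter_local', 'principled_adaptive', 'DIAL'}
--     bounds = {'base_only', 'always_trigger', 'oracle'}
--     cb = set(CB_PALETTE.keys()) | {k.lower() for k in CB_PALETTE}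
--     if method in dial:
--         return 'dial'
--     if method in bounds:
--         return 'bounds'
--     if method in cb:
--         return 'cb'
--     return 'other'
-- ===== SOURCE B (Python) =====
-- CB_PALETTE = {
--     'CaTS':     '#2980B9',   # blue
--     'SEAG':     '#E67E22',   # orange
--     'CoRefine': '#27AE60',   # green
--     'CATTS':    '#8E44AD',   # purple
--     'AUQ':      '#D35400',   # dark orange
--     's1_budget':'#16A085',   # teal
-- }
--
--
-- def _build_lookup():
--     # Priority order of the original fall-through: cb first, then bounds,
--     # then dial, so later (higher-priority) inserts overwrite collisions.
--     lookup = {}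
--     for name in CB_PALETTE:
--         lookup[name] = 'cb'
--         lookup[name.lower()] = 'cb'
--     for name in ('base_only', 'always_trigger', 'oracle'):
--         lookup[name] = 'bounds'
--     for name in ('se_few5_filter_local', 'principled_adaptive', 'DIAL'):
--         lookup[name] = 'dial'
--     return lookup
--
--
-- _LOOKUP = _build_lookup()
--
--
-- def categorize_method(method):
--     """Return category string for a method name."""
--     return _LOOKUP.get(method, 'other')
-- ===== Notes on version B (the rewrite author's own statement) =====
-- stated objective: simpler
-- what changed: Replaced the three per-call set constructions and sequential membership branches with one module-level lookup table built once in priority order; the body is a single dict.get.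
import Mathlib
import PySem

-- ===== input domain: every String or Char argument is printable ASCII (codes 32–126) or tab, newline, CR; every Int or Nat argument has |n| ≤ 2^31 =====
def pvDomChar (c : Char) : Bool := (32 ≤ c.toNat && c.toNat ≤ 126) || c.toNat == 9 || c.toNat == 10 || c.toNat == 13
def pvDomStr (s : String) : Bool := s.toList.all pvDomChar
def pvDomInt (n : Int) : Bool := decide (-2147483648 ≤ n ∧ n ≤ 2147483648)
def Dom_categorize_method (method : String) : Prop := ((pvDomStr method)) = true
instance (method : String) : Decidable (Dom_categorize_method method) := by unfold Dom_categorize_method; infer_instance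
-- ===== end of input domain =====

-- B replaces the three per-call set builds and sequential membership checks with one
-- lookup table built once in priority order; same return value on every input (simpler).

-- ===== PORT A =====
def CB_PALETTE : PySem.Dict String String := PySem.Dict.ofList
  [("CaTS", "#2980B9"), ("SEAG", "#E67E22"), ("CoRefine", "#27AE60"),
   ("CATTS", "#8E44AD"), ("AUQ", "#D35400"), ("s1_budget", "#16A085")]

def categorize_method (method : String) : String :=
  let dial : PySem.Set String :=
    PySem.Set.ofList ["se_few5_filter_local", "principled_adaptive", "DIAL"]
  let bounds : PySem.Set String :=
    PySem.Set.ofList ["base_only", "always_trigger", "oracle"]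
  let cb : PySem.Set String :=
    PySem.Set.union (PySem.Set.ofList CB_PALETTE.keys)
      (PySem.Set.ofList (CB_PALETTE.keys.map PySem.Str.lower))
  if PySem.Set.contains dial method then "dial"
  else if PySem.Set.contains bounds method then "bounds"
  else if PySem.Set.contains cb method then "cb"
  else "other"

-- ===== PORT B =====
def pvLookup : PySem.Dict String String :=
  let l1 := CB_PALETTE.keys.foldl
    (fun d name => (d.insert name "cb").insert (PySem.Str.lower name) "cb")
    PySem.Dict.empty
  let l2 := (["base_only", "always_trigger", "oracle"] : List String).foldl
    (fun d name => d.insert name "bounds") l1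
  (["se_few5_filter_local", "principled_adaptive", "DIAL"] : List String).foldl
    (fun d name => d.insert name "dial") l2

def categorize_method_alt (method : String) : String :=
  pvLookup.getD method "other"

-- ===== PRECONDITION & SPEC =====
def Spec_categorize_method (method : String) (out : String) : Prop := out = categorize_method_alt method
instance (method : String) (out : String) : Decidable (Spec_categorize_method method out) := by unfold Spec_categorize_method; infer_instance

-- ===== CLAIM (what is proved, stated in full; the proofs are below) =====
def Claim_equal_categorize_method : Prop := ∀ (method : String), Dom_categorize_method method → Spec_categorize_method method (categorize_method method)

-- ===== LEMMAS AND PROOFS =====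

lemma cb_eval :
    PySem.Set.union (PySem.Set.ofList CB_PALETTE.keys)
      (PySem.Set.ofList (CB_PALETTE.keys.map PySem.Str.lower)) =
    (["CaTS", "SEAG", "CoRefine", "CATTS", "AUQ", "s1_budget",
      "cats", "seag", "corefine", "catts", "auq"] : List String) := by decide

lemma pvLookup_eval :
    pvLookup = PySem.Dict.mk
      [("CaTS", "cb"), ("cats", "cb"), ("SEAG", "cb"), ("seag", "cb"),
       ("CoRefine", "cb"), ("corefine", "cb"), ("CATTS", "cb"), ("catts", "cb"),
       ("AUQ", "cb"), ("auq", "cb"), ("s1_budget", "cb"),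
       ("base_only", "bounds"), ("always_trigger", "bounds"), ("oracle", "bounds"),
       ("se_few5_filter_local", "dial"), ("principled_adaptive", "dial"), ("DIAL", "dial")] := by
  decide

-- ===== VERDICT (by name: the statement is the Claim_ definition above) =====
theorem categorize_method_spec : Claim_equal_categorize_method := by
  intro method _
  unfold Spec_categorize_method
  by_cases h1 : method = "se_few5_filter_local"; · subst h1; decide
  by_cases h2 : method = "principled_adaptive"; · subst h2; decide
  by_cases h3 : method = "DIAL"; · subst h3; decide
  by_cases h4 : method = "base_only"; · subst h4; decide
  by_cases h5 : method = "always_trigger"; · subst h5; decide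
  by_cases h6 : method = "oracle"; · subst h6; decide
  by_cases h7 : method = "CaTS"; · subst h7; decide
  by_cases h8 : method = "cats"; · subst h8; decide
  by_cases h9 : method = "SEAG"; · subst h9; decide
  by_cases h10 : method = "seag"; · subst h10; decide
  by_cases h11 : method = "CoRefine"; · subst h11; decide
  by_cases h12 : method = "corefine"; · subst h12; decide
  by_cases h13 : method = "CATTS"; · subst h13; decide
  by_cases h14 : method = "catts"; · subst h14; decide
  by_cases h15 : method = "AUQ"; · subst h15; decide
  by_cases h16 : method = "auq"; · subst h16; decide
  by_cases h17 : method = "s1_budget"; · subst h17; decide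
  simp only [categorize_method, categorize_method_alt, cb_eval, pvLookup_eval]
  simp [PySem.Set.contains, PySem.Dict.getD, PySem.Dict.get?, List.find?,
    beq_eq_false_iff_ne.mpr (Ne.symm h1), beq_eq_false_iff_ne.mpr (Ne.symm h2), beq_eq_false_iff_ne.mpr (Ne.symm h3), beq_eq_false_iff_ne.mpr (Ne.symm h4), beq_eq_false_iff_ne.mpr (Ne.symm h5), beq_eq_false_iff_ne.mpr (Ne.symm h6), beq_eq_false_iff_ne.mpr (Ne.symm h7), beq_eq_false_iff_ne.mpr (Ne.symm h8), beq_eq_false_iff_ne.mpr (Ne.symm h9), beq_eq_false_iff_ne.mpr (Ne.symm h10), beq_eq_false_iff_ne.mpr (Ne.symm h11), beq_eq_false_iff_ne.mpr (Ne.symm h12), beq_eq_false_iff_ne.mpr (Ne.symm h13), beq_eq_false_iff_ne.mpr (Ne.symm h14), beq_eq_false_iff_ne.mpr (Ne.symm h15), beq_eq_false_iff_ne.mpr (Ne.symm h16), beq_eq_false_iff_ne.mpr (Ne.symm h17),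
    h1, h2, h3, h4, h5, h6, h7, h8, h9, h10, h11, h12, h13, h14, h15, h16, h17]
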